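-- pv_equiv track=rewrite | github.com/Darrionat/CapEquivalenceClasses | cap.py | is_cap
-- ===== SOURCE A (Python) =====
-- from itertools import combinations
--
-- def is_cap(points):
--     """
--     Checks to see if any exclude points are contained in the set of points.
--     :param points: The points to check
--     :return: True/false if the points are a cap.
--     """
--     pairs = set()
--     for comb in combinations(points, 2):
--         sum_xor = comb[0] ^ comb[1]
--         if sum_xor in pairs:
--             return False
--         pairs.add(sum_xor)
--     return True
-- ===== SOURCE B (Python) =====
-- from itertools import combinations
--
-- def is_cap(points):
--     # Different decomposition: materialise all pairwise XORs, sort them, and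
--     # detect a duplicate as an adjacent equal pair in the sorted list.
--     xs = sorted(a ^ b for a, b in combinations(points, 2))
--     return not any(x == y for x, y in zip(xs, xs[1:]))
-- ===== Notes on version B (the rewrite author's own statement) =====
-- stated objective: alternative
-- what changed: Replaces A's incremental hash-set membership test with early return by building the full list of pairwise XORs, sorting it, and scanning once for an adjacent equal pair.
import Mathlib
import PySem

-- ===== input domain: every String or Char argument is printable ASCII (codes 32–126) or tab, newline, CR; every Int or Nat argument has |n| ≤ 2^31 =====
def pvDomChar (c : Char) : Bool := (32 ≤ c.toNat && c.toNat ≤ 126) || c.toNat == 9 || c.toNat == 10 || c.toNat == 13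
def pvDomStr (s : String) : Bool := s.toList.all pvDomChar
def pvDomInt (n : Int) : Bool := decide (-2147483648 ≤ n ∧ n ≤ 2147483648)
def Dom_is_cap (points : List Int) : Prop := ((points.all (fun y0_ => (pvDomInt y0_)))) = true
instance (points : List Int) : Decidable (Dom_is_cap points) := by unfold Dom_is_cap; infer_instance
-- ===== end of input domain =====

-- B replaces A's incremental seen-set duplicate check by sort-then-adjacent-scan over the full pairwise-XOR list (alternative decomposition, not claimed faster).


-- ===== PORT A =====
-- comb[0] ^ comb[1] for a combination comb (always of length 2 here); pyGetD is exact on in-range indices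
def pvXor2 (c : List Int) : Int :=
  PySem.Int.bxor (PySem.List.pyGetD c 0 0) (PySem.List.pyGetD c 1 0)

-- the 'for comb in combinations(points, 2)' loop with its early 'return False'
def pvCapLoop : List (List Int) → PySem.Set Int → Bool
  | [], _ => true
  | comb :: rest, pairs =>
      let sumXor := pvXor2 comb
      if sumXor ∈ pairs then false
      else pvCapLoop rest (PySem.Set.add pairs sumXor)

def is_cap (points : List Int) : Bool :=
  pvCapLoop (PySem.List.combinations points 2) PySem.Set.empty

-- ===== PORT B =====
def is_cap_alt (points : List Int) : Bool :=
  let xs := PySem.List.sorted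
      ((PySem.List.combinations points 2).map pvXor2) (fun x => x) false
  !((xs.zip (PySem.List.slice xs (some 1) none)).any (fun p => p.1 == p.2))

-- ===== PRECONDITION & SPEC =====
def Spec_is_cap (points : List Int) (out : Bool) : Prop := out = is_cap_alt points
instance (points : List Int) (out : Bool) : Decidable (Spec_is_cap points out) := by unfold Spec_is_cap; infer_instance

-- ===== CLAIM (what is proved, stated in full; the proofs are below) =====
def Claim_equal_is_cap : Prop := ∀ (points : List Int), Dom_is_cap points → Spec_is_cap points (is_cap points)

-- ===== LEMMAS AND PROOFS =====

-- A's loop succeeds iff the xor list is duplicate-free and disjoint from the seen set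
theorem pvCapLoop_true_iff (combs : List (List Int)) (seen : PySem.Set Int) :
    pvCapLoop combs seen = true ↔
      (combs.map pvXor2).Nodup ∧ ∀ c ∈ combs, pvXor2 c ∉ seen := by
  induction combs generalizing seen with
  | nil => simp [pvCapLoop]
  | cons c rest ih =>
      by_cases h : pvXor2 c ∈ seen
      · simp only [pvCapLoop, if_pos h]
        constructor
        · intro hfalse; exact absurd hfalse (by simp)
        · rintro ⟨-, hdisj⟩; exact absurd h (hdisj c (by simp))
      · simp only [pvCapLoop, if_neg h, ih, List.map_cons, List.nodup_cons,
          List.mem_map, List.mem_cons, PySem.Set.mem_add, not_or]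
        constructor
        · rintro ⟨hn, hd⟩
          refine ⟨⟨fun hmem => ?_, hn⟩, fun x hx => ?_⟩
          · rcases hmem with ⟨x, hx, hxe⟩
            exact (hd x hx).2 hxe
          · rcases hx with rfl | hx
            · exact h
            · exact (hd x hx).1
        · rintro ⟨⟨hnc, hn⟩, hd⟩
          exact ⟨hn, fun x hx => ⟨hd x (Or.inr hx), fun he => hnc ⟨x, hx, he⟩⟩⟩

-- the zip-adjacent scan finds no equal pair iff the list is an ≠-chain
theorem pvZipScan_iff (xs : List Int) :
    ((xs.zip xs.tail).any (fun p => p.1 == p.2) = false) ↔ xs.IsChain (· ≠ ·) := by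
  induction xs with
  | nil => simp
  | cons a t ih =>
      cases t with
      | nil => simp
      | cons b t' =>
          simp only [List.tail_cons, List.zip_cons_cons, List.any_cons,
            Bool.or_eq_false_iff, List.isChain_cons_cons, beq_eq_false_iff_ne] at *
          constructor
          · rintro ⟨h1, h2⟩; exact ⟨h1, ih.mp h2⟩
          · rintro ⟨h1, h2⟩; exact ⟨h1, ih.mpr h2⟩

-- a ≤-sorted list has no adjacent equal elements iff it is duplicate-free
theorem pvSortedNodup_iff (xs : List Int) (hs : xs.Pairwise (· ≤ ·)) :
    xs.IsChain (· ≠ ·) ↔ xs.Nodup := by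
  constructor
  · intro hc
    have hle : xs.IsChain (· ≤ ·) := List.isChain_iff_pairwise.mpr hs
    have hlt : xs.IsChain (· < ·) := by
      rw [List.isChain_iff_getElem] at hle hc ⊢
      intro i h
      exact lt_of_le_of_ne (hle i h) (hc i h)
    exact (List.IsChain.pairwise hlt).imp ne_of_lt
  · intro hn
    exact List.Pairwise.isChain hn

-- ===== VERDICT (by name: the statement is the Claim_ definition above) =====
theorem is_cap_spec : Claim_equal_is_cap := by
  intro points _
  unfold Spec_is_cap
  set L := (PySem.List.combinations points 2).map pvXor2 with hL
  set ys := PySem.List.sorted L (fun x => x) false with hys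
  have hperm : ys.Perm L := PySem.List.sorted_perm L _ false
  have hA : is_cap points = true ↔ L.Nodup := by
    unfold is_cap
    rw [pvCapLoop_true_iff]
    simp [PySem.Set.empty, ← hL]
  have hB : is_cap_alt points = true ↔ L.Nodup := by
    show (!((ys.zip (PySem.List.slice ys (some 1) none)).any (fun p => p.1 == p.2))) = true ↔ L.Nodup
    rw [Bool.not_eq_true', PySem.List.slice_from_one, pvZipScan_iff]
    rw [pvSortedNodup_iff ys (by simpa using PySem.List.sorted_pairwise L (fun x => x))]
    exact ⟨fun h => h.perm hperm, fun h => h.perm hperm.symm⟩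
  exact Bool.eq_iff_iff.mpr (hA.trans hB.symm)
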